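-- pv_equiv track=rewrite | github.com/staticintlucas/pykeyset | pykeyset/core/layout.py | parselegend
-- ===== SOURCE A (Python) =====
-- def parselegend(legend):
--
--     result = []
--
--     while len(legend) > 0:
--
--         # Reduce {{ and }} to a single { and }
--         if legend.startswith("{{") or legend.startswith("}}"):
--             result.append(legend[0])
--             legend = legend[2:]
--
--         # Parse {name} sequences in the text
--         elif legend[0] == "{":
--             end = legend.find("}")
--
--             # If there is no matching closing } or there is another { before the closing }
--             if end < 1 or "{" in legend[1:end]:
--                 result.append(legend[0])
--                 legend = legend[1:]
--
--             else:
--                 name = legend[0 : end + 1]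
--                 result.append(name)
--                 legend = legend[end + 1 :]
--
--         else:
--             result.append(legend[0])
--             legend = legend[1:]
--
--     return result
-- ===== SOURCE B (Python) =====
-- def parselegend(legend):
--     # One forward index-based tokenizer over the ordered alternation: doubled brace | group | any char.
--     result = []
--     i, n = 0, len(legend)
--     while i < n:
--         c = legend[i]
--         if i + 1 < n and c == legend[i + 1] and c in "{}":
--             result.append(c)
--             i += 2
--         elif c == "{":
--             j = i + 1
--             while j < n and legend[j] not in "{}":
--                 j += 1
--             if j < n and legend[j] == "}":
--                 result.append(legend[i : j + 1])
--                 i = j + 1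
--             else:
--                 result.append(c)
--                 i += 1
--         else:
--             result.append(c)
--             i += 1
--     return result
-- ===== Notes on version B (the rewrite author's own statement) =====
-- stated objective: faster
-- what changed: A repeatedly re-slices the remaining string and, per opening brace, runs find plus a substring-membership rescan; B is a single forward index-based tokenizer that scans once up to the first brace after each opening brace and never copies the remaining input.
import Mathlib
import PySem

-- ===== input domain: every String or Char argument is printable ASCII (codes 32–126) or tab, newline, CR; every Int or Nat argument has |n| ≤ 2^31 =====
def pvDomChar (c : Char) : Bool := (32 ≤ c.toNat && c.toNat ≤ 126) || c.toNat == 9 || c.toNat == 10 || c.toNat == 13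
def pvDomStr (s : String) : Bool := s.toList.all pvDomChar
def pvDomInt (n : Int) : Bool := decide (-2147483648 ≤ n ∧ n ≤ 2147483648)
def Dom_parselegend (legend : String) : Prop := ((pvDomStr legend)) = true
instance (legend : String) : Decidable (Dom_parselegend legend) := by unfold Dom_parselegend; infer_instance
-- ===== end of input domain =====

-- B replaces A's repeated string re-slicing (find + substring membership per opening brace)
-- with a single forward index-based tokenizer (objective: faster; measured).

-- ===== PORT A =====
-- A's while loop, transcribed as recursion over the code-point list; each iteration re-slices
-- the remaining legend exactly as the Python does (legend[2:], legend[1:], legend[end+1:] …).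

-- termination helper for port A (cited in decreasing_by): a slice legend[k:] with k ≥ 1 is shorter
theorem pvSliceFromLt (cs : List Char) (k : Int) (hk : 1 ≤ k) (hcs : cs ≠ []) :
    (PySem.List.slice cs (some k) none).length < cs.length := by
  rw [PySem.List.slice_some_none]
  unfold PySem.List.clampIdx
  rw [if_neg (by omega)]
  have h1 : 0 < cs.length := List.length_pos_iff.mpr hcs
  have h2 : 1 ≤ k.toNat := by omega
  simp
  omega

def parselegendAuxA (cs : List Char) : List String :=
  match cs with
  | [] => []
  | c :: rest =>
    -- if legend.startswith("{{") or legend.startswith("}}")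
    if PySem.Chars.startswith (c :: rest) ['{','{'] ∨ PySem.Chars.startswith (c :: rest) ['}','}'] then
      String.ofList [c] :: parselegendAuxA (PySem.List.slice (c :: rest) (some 2) none)
    -- elif legend[0] == "{"
    else if c = '{' then
      let e : Int := PySem.Chars.find (c :: rest) ['}']
      -- if end < 1 or "{" in legend[1:end]
      if _h : e < 1 ∨ PySem.Chars.isIn ['{'] (PySem.List.slice (c :: rest) (some 1) (some e)) then
        String.ofList [c] :: parselegendAuxA (PySem.List.slice (c :: rest) (some 1) none)
      else
        -- name = legend[0 : end + 1]
        String.ofList (PySem.List.slice (c :: rest) (some 0) (some (e + 1))) ::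
          parselegendAuxA (PySem.List.slice (c :: rest) (some (e + 1)) none)
    else
      String.ofList [c] :: parselegendAuxA (PySem.List.slice (c :: rest) (some 1) none)
  termination_by cs.length
  decreasing_by
  · exact pvSliceFromLt _ 2 (by norm_num) (by simp)
  · exact pvSliceFromLt _ 1 (by norm_num) (by simp)
  · exact pvSliceFromLt _ _ (by omega) (by simp)
  · exact pvSliceFromLt _ 1 (by norm_num) (by simp)

def parselegend (legend : String) : List String := parselegendAuxA legend.toList

-- ===== PORT B =====
-- B's index-based tokenizer over the code points: `legend[j] not in "{}"` is pvPlainChar,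
-- the inner `while` scan is takeWhile/dropWhile over that predicate.

def pvPlainChar (d : Char) : Bool := d != '{' && d != '}'

def parselegendAuxB (cs : List Char) : List String :=
  match cs with
  | [] => []
  | c :: rest =>
    -- if i + 1 < n and c == legend[i + 1] and c in "{}"
    if rest.head? = some c ∧ (c = '{' ∨ c = '}') then
      String.ofList [c] :: parselegendAuxB (rest.drop 1)
    -- elif c == "{"
    else if c = '{' then
      -- the inner while loop: j stops at the first brace after i, if any
      if _h : (rest.dropWhile pvPlainChar).head? = some '}' then
        String.ofList ('{' :: (rest.takeWhile pvPlainChar ++ ['}'])) ::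
          parselegendAuxB ((rest.dropWhile pvPlainChar).drop 1)
      else
        String.ofList [c] :: parselegendAuxB rest
    else
      String.ofList [c] :: parselegendAuxB rest
  termination_by cs.length
  decreasing_by
  · simp
  · have h1 := List.length_dropWhile_le (p := pvPlainChar) (l := rest)
    simp
    omega
  · simp
  · simp

def parselegend_alt (legend : String) : List String := parselegendAuxB legend.toList

-- ===== PRECONDITION & SPEC =====
def Spec_parselegend (legend : String) (out : List String) : Prop := out = parselegend_alt legend
instance (legend : String) (out : List String) : Decidable (Spec_parselegend legend out) := by unfold Spec_parselegend; infer_instance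

-- ===== CLAIM (what is proved, stated in full; the proofs are below) =====
def Claim_equal_parselegend : Prop := ∀ (legend : String), Dom_parselegend legend → Spec_parselegend legend (parselegend legend)

-- ===== LEMMAS AND PROOFS =====

-- s.find("}") when the string has no '}'
theorem pvFindSingletonNone (s : List Char) (c : Char) (h : c ∉ s) :
    PySem.Chars.find s [c] = -1 :=
  (PySem.Chars.find_eq_neg_one_iff s [c]).mpr (fun hin => h ((List.singleton_infix_iff c s).mp hin))

-- s.find(c) at the first occurrence of c
theorem pvFindSingletonSplit (pre suf : List Char) (c : Char) (h : c ∉ pre) :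
    PySem.Chars.find (pre ++ c :: suf) [c] = (pre.length : Int) := by
  set s := pre ++ c :: suf with hs
  have hmem : c ∈ s := by simp [hs]
  have hne : PySem.Chars.find s [c] ≠ -1 :=
    (PySem.Chars.find_ne_neg_one_iff s [c]).mpr ((List.singleton_infix_iff c s).mpr hmem)
  have hspec := PySem.Chars.findFrom_natCast_spec s [c] 0 (by omega) (by
    rw [Nat.cast_zero, PySem.Chars.findFrom_zero]; exact hne)
  rw [Nat.cast_zero, PySem.Chars.findFrom_zero] at hspec
  obtain ⟨h0, hpre, hmin⟩ := hspec
  have hA : [c] <+: s.drop pre.length := by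
    rw [hs, List.drop_left]; exact ⟨suf, rfl⟩
  have hle : ¬ (pre.length < (PySem.Chars.find s [c]).toNat) := fun hlt =>
    hmin pre.length (Nat.zero_le _) hlt hA
  have hge : ¬ ((PySem.Chars.find s [c]).toNat < pre.length) := by
    intro hlt
    obtain ⟨t, ht⟩ := hpre
    have hgoal : s[(PySem.Chars.find s [c]).toNat]? = some c := by
      rw [← List.head?_drop, ← ht]; rfl
    rw [hs, List.getElem?_append_left hlt] at hgoal
    exact h (List.mem_of_getElem? hgoal)
  omega

-- A's first condition coincides with B's first condition
theorem pvStartIff (c : Char) (rest : List Char) :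
    (PySem.Chars.startswith (c :: rest) ['{','{'] = true ∨
     PySem.Chars.startswith (c :: rest) ['}','}'] = true) ↔
      (rest.head? = some c ∧ (c = '{' ∨ c = '}')) := by
  simp only [PySem.Chars.startswith_iff]
  cases rest with
  | nil => simp [List.cons_prefix_cons]
  | cons d tl =>
    simp [List.cons_prefix_cons]
    constructor
    · rintro (⟨h1, h2⟩ | ⟨h1, h2⟩) <;> subst h1 <;> subst h2 <;> simp
    · rintro ⟨h1, (h2 | h2)⟩ <;> subst h2 <;> simp_all

theorem pvAuxEq (n : Nat) : ∀ cs : List Char, cs.length ≤ n →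
    parselegendAuxA cs = parselegendAuxB cs := by
  induction n with
  | zero =>
    intro cs hle
    have h0 : cs = [] := List.eq_nil_of_length_eq_zero (by omega)
    subst h0
    rw [parselegendAuxA, parselegendAuxB]
  | succ n ih =>
    intro cs hle
    match cs with
    | [] => rw [parselegendAuxA, parselegendAuxB]
    | c :: rest =>
      have hlen : rest.length ≤ n := by simp at hle; omega
      by_cases hb1 : rest.head? = some c ∧ (c = '{' ∨ c = '}')
      · -- both reduce a double brace
        rw [parselegendAuxA, parselegendAuxB, if_pos ((pvStartIff c rest).mpr hb1), if_pos hb1,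
          PySem.List.slice_from _ (by norm_num)]
        show String.ofList [c] :: parselegendAuxA (rest.drop 1) = _
        exact congrArg _ (ih _ (by simp; omega))
      · have hA1 : ¬ (PySem.Chars.startswith (c :: rest) ['{','{'] = true ∨
            PySem.Chars.startswith (c :: rest) ['}','}'] = true) :=
          fun h => hb1 ((pvStartIff c rest).mp h)
        by_cases hc : c = '{'
        · subst hc
          have hsplit : rest.takeWhile pvPlainChar ++ rest.dropWhile pvPlainChar = rest :=
            List.takeWhile_append_dropWhile
          have hmidL : '{' ∉ rest.takeWhile pvPlainChar := fun hd => by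
            have := List.mem_takeWhile_imp hd; simp [pvPlainChar] at this
          have hmidR : '}' ∉ rest.takeWhile pvPlainChar := fun hd => by
            have := List.mem_takeWhile_imp hd; simp [pvPlainChar] at this
          rw [parselegendAuxA, parselegendAuxB, if_neg hA1, if_neg hb1, if_pos rfl, if_pos rfl]
          show (if _h : PySem.Chars.find ('{' :: rest) ['}'] < 1 ∨
              PySem.Chars.isIn ['{'] (PySem.List.slice ('{' :: rest) (some 1)
                (some (PySem.Chars.find ('{' :: rest) ['}']))) = true then
              String.ofList ['{'] :: parselegendAuxA (PySem.List.slice ('{' :: rest) (some 1) none)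
            else
              String.ofList (PySem.List.slice ('{' :: rest) (some 0)
                  (some (PySem.Chars.find ('{' :: rest) ['}'] + 1))) ::
                parselegendAuxA (PySem.List.slice ('{' :: rest)
                  (some (PySem.Chars.find ('{' :: rest) ['}'] + 1)) none)) = _
          obtain ⟨mid, hmidq⟩ : ∃ m, List.takeWhile pvPlainChar rest = m := ⟨_, rfl⟩
          rw [hmidq] at hsplit hmidL hmidR ⊢
          rcases hq : List.dropWhile pvPlainChar rest with _ | ⟨d, tl⟩
          · -- rest contains no brace: A finds no '}' (end = -1), B's scan hits the end
            have hall := List.dropWhile_eq_nil_iff.mp hq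
            have hfind : PySem.Chars.find ('{' :: rest) ['}'] = -1 := by
              apply pvFindSingletonNone
              intro hm
              rcases List.mem_cons.mp hm with h | h
              · exact absurd h (by decide)
              · have := hall _ h; simp [pvPlainChar] at this
            rw [hfind, dif_pos (Or.inl (by norm_num)), dif_neg (by simp),
              PySem.List.slice_from _ (by norm_num)]
            show String.ofList ['{'] :: parselegendAuxA rest = _
            exact congrArg _ (ih _ hlen)
          · -- B's scan stops at the first brace d of rest
            rw [hq] at hsplit
            have hrest : rest = mid ++ d :: tl := hsplit.symm
            have hdF : pvPlainChar d = false := by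
              have h0 : 0 < (rest.dropWhile pvPlainChar).length := by rw [hq]; simp
              have := List.dropWhile_get_zero_not pvPlainChar rest h0
              simp only [List.get_eq_getElem, hq] at this
              simpa using this
            have hlentl : tl.length ≤ n := by
              have := congrArg List.length hrest; simp at this; omega
            by_cases hd : d = '}'
            · -- first brace is '}': A takes the {name} branch, B emits the same token
              subst hd
              have hshape : ('{' :: rest) = ('{' :: mid) ++ '}' :: tl := by
                conv_lhs => rw [hrest]
                simp
              have hfind : PySem.Chars.find ('{' :: rest) ['}'] =
                  ((mid.length + 1 : Nat) : Int) := by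
                rw [hshape, pvFindSingletonSplit _ _ _ (by
                  intro hm
                  rcases List.mem_cons.mp hm with h | h
                  · exact absurd h (by decide)
                  · exact hmidR h)]
                simp
              rw [hfind]
              have htakemid : rest.take mid.length = mid := by
                conv_lhs => rw [hrest]
                exact List.take_left
              rw [dif_neg (by
                rintro (hlt | hin)
                · omega
                · rw [PySem.List.slice_toNat _ (by norm_num) (by positivity)] at hin
                  simp only [Int.toNat_natCast, Int.toNat_one] at hin
                  rw [Nat.add_sub_cancel] at hin
                  have hdrop : List.drop 1 ('{' :: rest) = rest := rfl
                  rw [hdrop, htakemid] at hin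
                  exact hmidL (((List.singleton_infix_iff _ _).mp
                    ((PySem.Chars.isIn_iff_infix _ _).mp hin))))]
              have htok : PySem.List.slice ('{' :: rest) (some 0)
                  (some (((mid.length + 1 : Nat) : Int) + 1)) = '{' :: (mid ++ ['}']) := by
                rw [PySem.List.slice_zero_start, PySem.List.slice_to _ (by positivity)]
                have hcast : ((((mid.length + 1 : Nat) : Int) + 1)).toNat = mid.length + 2 := by
                  omega
                rw [hcast]
                show '{' :: rest.take (mid.length + 1) = _
                conv_lhs => rw [hrest]
                rw [List.append_cons, List.take_left' (by simp)]
              have harg : PySem.List.slice ('{' :: rest)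
                  (some (((mid.length + 1 : Nat) : Int) + 1)) none = tl := by
                rw [PySem.List.slice_from _ (by positivity)]
                have hcast : ((((mid.length + 1 : Nat) : Int) + 1)).toNat = mid.length + 2 := by
                  omega
                rw [hcast]
                show rest.drop (mid.length + 1) = tl
                conv_lhs => rw [hrest]
                rw [List.append_cons, List.drop_left' (by simp)]
              rw [htok, harg, dif_pos (by simp)]
              show _ = String.ofList ('{' :: (mid ++ ['}'])) :: parselegendAuxB tl
              exact congrArg _ (ih _ hlentl)
            · -- first brace is another '{': A appends the lone '{' (end < 1, or a '{' before the '}')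
              have hd2 : d = '{' := by
                revert hdF hd; simp [pvPlainChar]; tauto
              subst hd2
              have hcond : PySem.Chars.find ('{' :: rest) ['}'] < 1 ∨
                  PySem.Chars.isIn ['{'] (PySem.List.slice ('{' :: rest) (some 1)
                    (some (PySem.Chars.find ('{' :: rest) ['}']))) = true := by
                obtain ⟨F, hF⟩ : ∃ F, PySem.Chars.find ('{' :: rest) ['}'] = F := ⟨_, rfl⟩
                rw [hF]
                by_cases hf : F = -1
                · exact Or.inl (by rw [hf]; norm_num)
                · right
                  have hshape : ('{' :: rest) = ('{' :: mid ++ ['{']) ++ tl := by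
                    conv_lhs => rw [hrest]
                    simp
                  have hspec := PySem.Chars.findFrom_natCast_spec ('{' :: rest) ['}'] 0
                    (Nat.zero_le _) (by
                      rw [Nat.cast_zero, PySem.Chars.findFrom_zero, hF]; exact hf)
                  rw [Nat.cast_zero, PySem.Chars.findFrom_zero, hF] at hspec
                  obtain ⟨h0, hpre, hmin⟩ := hspec
                  have hfP : mid.length + 2 ≤ F.toNat := by
                    by_contra hlt
                    push Not at hlt
                    obtain ⟨t, ht⟩ := hpre
                    have hge : ('{' :: rest)[F.toNat]? = some '}' := by
                      rw [← List.head?_drop, ← ht]; rfl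
                    rw [hshape, List.getElem?_append_left (by simp; omega)] at hge
                    have hmem := List.mem_of_getElem? hge
                    rcases List.mem_cons.mp hmem with h | h
                    · exact absurd h (by decide)
                    · rcases List.mem_append.mp h with h | h
                      · exact hmidR h
                      · simp at h
                  rw [PySem.List.slice_toNat _ (by norm_num) (by omega)]
                  rw [PySem.Chars.isIn_iff_infix, List.singleton_infix_iff]
                  have hdrop : List.drop (Int.toNat 1) ('{' :: rest) = rest := rfl
                  rw [hdrop]
                  show '{' ∈ rest.take (F.toNat - 1)
                  have hidx : (rest.take (F.toNat - 1))[mid.length]? = some '{' := by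
                    rw [List.getElem?_take_of_lt (by omega)]
                    conv_lhs => rw [hrest]
                    rw [List.getElem?_append_right (le_refl _)]
                    simp
                  exact List.mem_of_getElem? hidx
              rw [dif_pos hcond, dif_neg (by simp), PySem.List.slice_from _ (by norm_num)]
              show String.ofList ['{'] :: parselegendAuxA rest = _
              exact congrArg _ (ih _ hlen)
        · -- plain character
          rw [parselegendAuxA, parselegendAuxB, if_neg hA1, if_neg hb1, if_neg hc, if_neg hc,
            PySem.List.slice_from _ (by norm_num)]
          show String.ofList [c] :: parselegendAuxA rest = _
          exact congrArg _ (ih _ hlen)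

-- ===== VERDICT (by name: the statement is the Claim_ definition above) =====
theorem parselegend_spec : Claim_equal_parselegend := by
  intro legend _
  show parselegend legend = parselegend_alt legend
  exact pvAuxEq legend.toList.length legend.toList le_rfl
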